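-- pv_equiv track=rewrite | github.com/Triceraprog/vg5000_tools | float.py | shift_right_one
-- ===== SOURCE A (Python) =====
-- def shift_right_one(input_code):
--     output = []
--     carry = 0
--     for b in input_code:
--         new_carry = b & 1
--         b >>= 1
--         b |= carry << 7
--         output.append(b)
--         carry = new_carry
--     return output
-- ===== SOURCE B (Python) =====
-- def shift_right_one(input_code):
--     out = []
--     for i in reversed(range(1, len(input_code))):
--         out.append((input_code[i - 1] & 1) << 7 | input_code[i] >> 1)
--     if input_code:
--         out.append(input_code[0] >> 1)
--     out.reverse()
--     return out
-- ===== Notes on version B (the rewrite author's own statement) =====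
-- stated objective: alternative
-- what changed: B replaces the forward pass with a carry accumulator by a stateless back-to-front traversal that reads each element's left neighbour directly and reverses the assembled output at the end.
import Mathlib
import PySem

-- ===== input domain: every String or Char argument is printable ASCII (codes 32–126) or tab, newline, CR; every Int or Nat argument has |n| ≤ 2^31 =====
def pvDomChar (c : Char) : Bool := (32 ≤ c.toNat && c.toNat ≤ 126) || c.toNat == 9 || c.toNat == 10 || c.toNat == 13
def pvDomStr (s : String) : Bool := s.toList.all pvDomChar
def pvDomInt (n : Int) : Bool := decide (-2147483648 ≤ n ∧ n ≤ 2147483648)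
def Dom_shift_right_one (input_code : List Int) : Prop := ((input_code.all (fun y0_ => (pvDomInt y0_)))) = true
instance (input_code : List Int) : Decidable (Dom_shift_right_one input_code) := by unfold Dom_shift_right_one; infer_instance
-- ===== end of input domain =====

-- B traverses the array back-to-front, reading each element's left neighbour directly instead of
-- carrying a running accumulator, and reverses the assembled output; alternative, same O(n) cost.


-- ===== PORT A =====
-- for b in input_code: new_carry = b & 1; b >>= 1; b |= carry << 7; output.append(b); carry = new_carry
def shift_right_one (input_code : List Int) : List Int :=
  (input_code.foldl
    (fun (st : List Int × Int) b =>
      let new_carry := PySem.Int.band b 1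
      let b1 := b >>> (1 : Nat)
      let b2 := PySem.Int.bor b1 (st.2 <<< (7 : Nat))
      (st.1 ++ [b2], new_carry))
    ([], 0)).1

-- ===== PORT B =====
-- out = []
-- for i in reversed(range(1, len(input_code))): out.append((input_code[i-1] & 1) << 7 | input_code[i] >> 1)
-- if input_code: out.append(input_code[0] >> 1)
-- out.reverse(); return out
def shift_right_one_alt (input_code : List Int) : List Int :=
  let out : List Int :=
    ((PySem.List.pyRange 1 (input_code.length : Int) 1).reverse).foldl
      (fun acc i =>
        acc ++ [PySem.Int.bor ((PySem.Int.band (PySem.List.pyGetD input_code (i - 1) 0) 1) <<< (7 : Nat))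
                              (PySem.List.pyGetD input_code i 0 >>> (1 : Nat))])
      []
  let out2 := if input_code.isEmpty then out
              else out ++ [PySem.List.pyGetD input_code 0 0 >>> (1 : Nat)]
  out2.reverse

-- ===== PRECONDITION & SPEC =====
def Spec_shift_right_one (input_code : List Int) (out : List Int) : Prop := out = shift_right_one_alt input_code
instance (input_code : List Int) (out : List Int) : Decidable (Spec_shift_right_one input_code out) := by unfold Spec_shift_right_one; infer_instance

-- ===== CLAIM (what is proved, stated in full; the proofs are below) =====
def Claim_equal_shift_right_one : Prop := ∀ (input_code : List Int), Dom_shift_right_one input_code → Spec_shift_right_one input_code (shift_right_one input_code)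

-- ===== LEMMAS AND PROOFS =====

-- Recursive representation of A's loop with incoming carry c.
def pvLoopA : Int → List Int → List Int
  | _, [] => []
  | c, b :: bs => PySem.Int.bor (b >>> (1 : Nat)) (c <<< (7 : Nat)) :: pvLoopA (PySem.Int.band b 1) bs

-- B's loop body as a function of the index.
def pvBody (ic : List Int) (i : Int) : Int :=
  PySem.Int.bor ((PySem.Int.band (PySem.List.pyGetD ic (i - 1) 0) 1) <<< (7 : Nat))
                (PySem.List.pyGetD ic i 0 >>> (1 : Nat))

theorem pvFoldA_eq (bs : List Int) : ∀ (acc : List Int) (c : Int),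
    (bs.foldl
      (fun (st : List Int × Int) b =>
        let new_carry := PySem.Int.band b 1
        let b1 := b >>> (1 : Nat)
        let b2 := PySem.Int.bor b1 (st.2 <<< (7 : Nat))
        (st.1 ++ [b2], new_carry))
      (acc, c)).1 = acc ++ pvLoopA c bs := by
  induction bs with
  | nil => intro acc c; simp [pvLoopA]
  | cons b bs ih => intro acc c; simp [List.foldl, pvLoopA, ih, List.append_assoc]

theorem pvShiftA (input_code : List Int) :
    shift_right_one input_code = pvLoopA 0 input_code := by
  unfold shift_right_one
  simpa using pvFoldA_eq input_code [] 0

-- A's loop from position j+1 on (carry = low bit of element j) computes pvBody at indices j+1 … L-1.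
theorem pvLoopA_indexed (ic : List Int) : ∀ (k j : Nat), j + k = ic.length →
    pvLoopA (PySem.Int.band (ic.getD j 0) 1) (ic.drop (j + 1))
      = (PySem.List.pyRange ((j : Int) + 1) (ic.length : Int) 1).map (pvBody ic) := by
  intro k
  induction k with
  | zero =>
    intro j hj
    rw [List.drop_eq_nil_of_le (by omega), PySem.List.pyRange_one_eq_nil (by exact_mod_cast by omega)]
    simp [pvLoopA]
  | succ k ih =>
    intro j hj
    have hjlt : j + 1 < ic.length + 1 := by omega
    rcases Nat.lt_or_ge (j + 1) ic.length with hlt | hge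
    · -- element j+1 exists: peel one step on both sides
      have hdrop : ic.drop (j + 1) = ic[j + 1] :: ic.drop (j + 2) :=
        (List.drop_eq_getElem_cons hlt)
      have hcons : PySem.List.pyRange ((j : Int) + 1) (ic.length : Int) 1
          = ((j : Int) + 1) :: PySem.List.pyRange ((j : Int) + 1 + 1) (ic.length : Int) 1 :=
        PySem.List.pyRange_one_cons (by exact_mod_cast hlt)
      rw [hdrop, hcons, List.map_cons]
      have ihj : pvLoopA (PySem.Int.band (ic.getD (j + 1) 0) 1) (ic.drop (j + 1 + 1))
          = (PySem.List.pyRange (((j + 1 : Nat) : Int) + 1) (ic.length : Int) 1).map (pvBody ic) :=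
        ih (j + 1) (by omega)
      simp only [pvLoopA]
      refine List.cons_eq_cons.mpr ⟨?_, ?_⟩
      · -- heads agree
        unfold pvBody
        have h1 : ((j : Int) + 1) - 1 = ((j : Nat) : Int) := by ring
        rw [h1, PySem.List.pyGetD_natCast]
        have h2 : ((j : Int) + 1) = (((j + 1 : Nat)) : Int) := by push_cast; ring
        rw [h2, PySem.List.pyGetD_natCast]
        rw [List.getD_eq_getElem ic 0 hlt, PySem.Int.bor_comm]
      · -- tails agree, by the induction hypothesis
        rw [List.getD_eq_getElem ic 0 hlt] at ihj
        have hcast : (((j + 1 : Nat)) : Int) + 1 = ((j : Int) + 1 + 1) := by push_cast; ring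
        rw [hcast] at ihj
        exact ihj
    · -- j+1 = length: both sides empty
      rw [List.drop_eq_nil_of_le (by omega), PySem.List.pyRange_one_eq_nil (by exact_mod_cast by omega)]
      simp [pvLoopA]

-- B unfolded: empty input gives [], otherwise head formula followed by pvBody over indices 1 … L-1.
theorem pvShiftB (b : Int) (bs : List Int) :
    shift_right_one_alt (b :: bs)
      = (b >>> (1 : Nat)) :: (PySem.List.pyRange 1 ((b :: bs).length : Int) 1).map (pvBody (b :: bs)) := by
  unfold shift_right_one_alt
  simp only [List.isEmpty_cons, if_neg Bool.false_ne_true]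
  rw [PySem.List.foldl_append_singleton_eq_map]
  rw [List.map_reverse]
  simp only [List.nil_append, List.reverse_append, List.reverse_reverse, List.reverse_cons,
    List.reverse_nil, List.nil_append, List.singleton_append]
  congr 1
  show PySem.List.pyGetD (b :: bs) ((0 : Nat) : Int) 0 >>> (1 : Nat) = b >>> (1 : Nat)
  rw [PySem.List.pyGetD_natCast]
  rfl

-- ===== VERDICT (by name: the statement is the Claim_ definition above) =====
theorem shift_right_one_spec : Claim_equal_shift_right_one := by
  intro input_code _
  unfold Spec_shift_right_one
  rw [pvShiftA]
  cases input_code with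
  | nil => rfl
  | cons b bs =>
    rw [pvShiftB]
    simp only [pvLoopA]
    refine List.cons_eq_cons.mpr ⟨?_, ?_⟩
    · simp [PySem.Int.bor_zero]
    · have := pvLoopA_indexed (b :: bs) (b :: bs).length 0 (by omega)
      simpa using this
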